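-- pv_equiv track=rewrite | github.com/qeedquan/challenges | codegolf/eight-coins-for-the-fair-king.py | eight_coins
-- ===== SOURCE A (Python) =====
-- def eight_coins(c):
--     x = set(c)
--     if 1 not in x:
--         return 0
--
--     i = 0
--     while i < 3:
--         x |= {a + b for a in x for b in x}
--         i += 1
--     while {i + 1} & x:
--         i += 1
--
--     return i
-- ===== SOURCE B (Python) =====
-- def eight_coins(c):
--     # coin-at-a-time sumset growth: 7 single-coin extensions instead of 3
--     # self-sumset doubling rounds; then a plain run scan from 0.
--     if 1 not in c:
--         return 0
--     coins = set(c)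
--     sums = set(coins)
--     for _ in range(7):
--         sums |= {s + a for s in sums for a in coins}
--     k = 0
--     while k + 1 in sums:
--         k += 1
--     return k
-- ===== Notes on version B (the rewrite author's own statement) =====
-- stated objective: alternative
-- what changed: B grows the reachable-sum set by adding ONE coin per pass (7 linear sumset extensions S |= S + coins) instead of A's three quadratic self-sumset rounds (x |= x + x), and scans the consecutive run from 0 instead of from A's leftover loop counter 3.
import Mathlib
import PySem

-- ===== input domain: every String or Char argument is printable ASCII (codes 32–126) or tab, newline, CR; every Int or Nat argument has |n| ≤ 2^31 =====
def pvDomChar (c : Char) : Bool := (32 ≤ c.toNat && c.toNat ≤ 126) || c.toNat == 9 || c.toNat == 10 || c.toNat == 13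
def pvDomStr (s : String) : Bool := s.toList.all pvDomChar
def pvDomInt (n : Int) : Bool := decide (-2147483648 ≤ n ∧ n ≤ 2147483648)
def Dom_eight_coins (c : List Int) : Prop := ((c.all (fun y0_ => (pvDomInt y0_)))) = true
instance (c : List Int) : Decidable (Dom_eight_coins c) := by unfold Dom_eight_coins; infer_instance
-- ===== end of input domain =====

-- B replaces A's three quadratic self-sumset rounds by seven single-coin sumset
-- extensions and scans the run from 0 instead of from A's leftover counter 3
-- (objective: alternative — a linear-extension sumset build instead of doubling rounds).

-- max of an Int list with default 0 (used only as a termination measure bound)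
def pvSetMax (l : List Int) : Int := l.foldr max 0

theorem le_pvSetMax (l : List Int) (v : Int) (h : v ∈ l) : v ≤ pvSetMax l := by
  induction l with
  | nil => cases h
  | cons a t ih =>
    rcases List.mem_cons.mp h with rfl | h'
    · exact le_max_left _ _
    · exact le_trans (ih h') (le_max_right _ _)

-- ===== PORT A =====
-- one round of `x |= {a + b for a in x for b in x}`
def pvRoundA (x : PySem.Set Int) : PySem.Set Int :=
  PySem.Set.union x (PySem.Set.ofList (x.flatMap (fun a => x.map (fun b => a + b))))

-- `while {i+1} & x: i += 1` — the truth test `{i+1} & x` is exactly `(i+1) ∈ x`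
def pvScanA (x : PySem.Set Int) (i : Int) : Int :=
  if h : (i + 1) ∈ x then pvScanA x (i + 1) else i
termination_by (pvSetMax x + 1 - i).toNat
decreasing_by
  have := le_pvSetMax x (i + 1) h
  omega

def eight_coins (c : List Int) : Int :=
  let x := PySem.Set.ofList c
  if 1 ∈ x then
    -- `i = 0; while i < 3: x |= {...}; i += 1`  (three rounds, then i = 3)
    pvScanA (pvRoundA (pvRoundA (pvRoundA x))) 3
  else 0

-- ===== PORT B =====
-- one pass of `sums |= {s + a for s in sums for a in coins}`
def pvGrowB (sums : PySem.Set Int) (coins : PySem.Set Int) : PySem.Set Int :=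
  PySem.Set.union sums (PySem.Set.ofList (sums.flatMap (fun s => coins.map (fun a => s + a))))

-- `k = 0; while k + 1 in sums: k += 1`
def pvScanB (sums : PySem.Set Int) (k : Int) : Int :=
  if h : (k + 1) ∈ sums then pvScanB sums (k + 1) else k
termination_by (pvSetMax sums + 1 - k).toNat
decreasing_by
  have := le_pvSetMax sums (k + 1) h
  omega

def eight_coins_alt (c : List Int) : Int :=
  if 1 ∈ c then
    let coins := PySem.Set.ofList c
    let sums := PySem.Set.ofList coins
    let sums := (List.range 7).foldl (fun s _ => pvGrowB s coins) sums
    pvScanB sums 0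
  else 0

-- ===== PRECONDITION & SPEC =====
def Spec_eight_coins (c : List Int) (out : Int) : Prop := out = eight_coins_alt c
instance (c : List Int) (out : Int) : Decidable (Spec_eight_coins c out) := by unfold Spec_eight_coins; infer_instance

-- ===== CLAIM (what is proved, stated in full; the proofs are below) =====
def Claim_equal_eight_coins : Prop := ∀ (c : List Int), Dom_eight_coins c → Spec_eight_coins c (eight_coins c)

-- ===== LEMMAS AND PROOFS =====

-- v is a sum of exactly j coins drawn (with repetition) from c
def NSum (c : List Int) : Nat → Int → Prop
  | 0, v => v = 0
  | j + 1, v => ∃ a ∈ c, NSum c j (v - a)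

-- v is a sum of between 1 and k coins from c
def Reach (c : List Int) (k : Nat) (v : Int) : Prop :=
  ∃ j, 1 ≤ j ∧ j ≤ k ∧ NSum c j v

theorem NSum_one (c : List Int) (v : Int) : NSum c 1 v ↔ v ∈ c := by
  simp only [NSum]
  constructor
  · rintro ⟨a, ha, h0⟩
    have : v = a := by omega
    simpa [this]
  · intro hv; exact ⟨v, hv, by omega⟩

theorem NSum_add (c : List Int) (j k : Nat) (a b : Int)
    (hj : NSum c j a) (hk : NSum c k b) : NSum c (j + k) (a + b) := by
  induction j generalizing a with
  | zero =>
    simp only [NSum] at hj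
    simpa [hj] using hk
  | succ j ih =>
    obtain ⟨x, hx, hrest⟩ := hj
    have h2 : NSum c (j + k) (a - x + b) := ih _ hrest
    have hidx : j + 1 + k = (j + k) + 1 := by omega
    rw [hidx]
    refine ⟨x, hx, ?_⟩
    have h3 : a + b - x = a - x + b := by ring
    rw [h3]; exact h2

theorem NSum_split (c : List Int) (p q : Nat) (v : Int)
    (h : NSum c (p + q) v) : ∃ a b, NSum c p a ∧ NSum c q b ∧ v = a + b := by
  induction p generalizing v with
  | zero => exact ⟨0, v, rfl, by simpa using h, by ring⟩
  | succ p ih =>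
    have h' : NSum c ((p + q) + 1) v := by
      have : p + 1 + q = (p + q) + 1 := by omega
      rwa [this] at h
    obtain ⟨x, hx, hrest⟩ := h'
    obtain ⟨a, b, hpa, hqb, hab⟩ := ih _ hrest
    refine ⟨a + x, b, ⟨x, hx, ?_⟩, hqb, by omega⟩
    simpa using hpa

-- 1 ∈ c → every positive integer j is a sum of j ones
theorem NSum_ones (c : List Int) (h1 : (1 : Int) ∈ c) (j : Nat) : NSum c j (j : Int) := by
  induction j with
  | zero => simp [NSum]
  | succ j ih =>
    refine ⟨1, h1, ?_⟩
    have : ((j : Nat) + 1 : Int) - 1 = (j : Int) := by omega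
    simpa [this] using ih

theorem Reach_small (c : List Int) (h1 : (1 : Int) ∈ c) (j : Nat)
    (hj1 : 1 ≤ j) (hj8 : j ≤ 8) : Reach c 8 (j : Int) :=
  ⟨j, hj1, hj8, NSum_ones c h1 j⟩

-- membership in one self-sumset round of A
theorem mem_roundA (c : List Int) (x : PySem.Set Int) (m : Nat) (hm : 1 ≤ m)
    (H : ∀ v, v ∈ x ↔ Reach c m v) :
    ∀ v, v ∈ pvRoundA x ↔ Reach c (2 * m) v := by
  intro v
  rw [pvRoundA, PySem.Set.mem_union, PySem.Set.mem_ofList]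
  simp only [List.mem_flatMap, List.mem_map]
  constructor
  · rintro (hv | ⟨a, ha, b, hb, rfl⟩)
    · obtain ⟨j, hj1, hjm, hs⟩ := (H v).mp hv
      exact ⟨j, hj1, by omega, hs⟩
    · obtain ⟨j1, hj11, hj1m, hs1⟩ := (H a).mp ha
      obtain ⟨j2, hj21, hj2m, hs2⟩ := (H b).mp hb
      exact ⟨j1 + j2, by omega, by omega, NSum_add c j1 j2 a b hs1 hs2⟩
  · rintro ⟨j, hj1, hj2m, hs⟩
    by_cases hjm : j ≤ m
    · exact Or.inl ((H v).mpr ⟨j, hj1, hjm, hs⟩)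
    · right
      have hsplit : NSum c (m + (j - m)) v := by
        have : m + (j - m) = j := by omega
        rwa [this]
      obtain ⟨a, b, ha, hb, rfl⟩ := NSum_split c m (j - m) v hsplit
      exact ⟨a, (H a).mpr ⟨m, hm, le_rfl, ha⟩,
             b, (H b).mpr ⟨j - m, by omega, by omega, hb⟩, rfl⟩

-- membership in one single-coin extension of B
theorem mem_growB (c : List Int) (sums coins : PySem.Set Int) (t : Nat) (ht : 1 ≤ t)
    (Hc : ∀ v, v ∈ coins ↔ v ∈ c) (H : ∀ v, v ∈ sums ↔ Reach c t v) :
    ∀ v, v ∈ pvGrowB sums coins ↔ Reach c (t + 1) v := by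
  intro v
  rw [pvGrowB, PySem.Set.mem_union, PySem.Set.mem_ofList]
  simp only [List.mem_flatMap, List.mem_map]
  constructor
  · rintro (hv | ⟨s, hs, a, ha, rfl⟩)
    · obtain ⟨j, hj1, hjt, hn⟩ := (H v).mp hv
      exact ⟨j, hj1, by omega, hn⟩
    · obtain ⟨j, hj1, hjt, hn⟩ := (H s).mp hs
      have h1 : NSum c 1 a := (NSum_one c a).mpr ((Hc a).mp ha)
      exact ⟨j + 1, by omega, by omega, NSum_add c j 1 s a hn h1⟩
  · rintro ⟨j, hj1, hjt1, hn⟩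
    by_cases hjt : j ≤ t
    · exact Or.inl ((H v).mpr ⟨j, hj1, hjt, hn⟩)
    · right
      have hj : j = (j - 1) + 1 := by omega
      have hsplit : NSum c ((j - 1) + 1) v := by rwa [← hj]
      obtain ⟨a, b, ha, hb, rfl⟩ := NSum_split c (j - 1) 1 v hsplit
      exact ⟨a, (H a).mpr ⟨j - 1, by omega, by omega, ha⟩,
             b, (Hc b).mpr ((NSum_one c b).mp hb), rfl⟩

-- the two scans agree on sets with the same members
theorem scan_congr (x y : PySem.Set Int) (h : ∀ v, v ∈ x ↔ v ∈ y) :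
    ∀ n i, (pvSetMax x + 1 - i).toNat ≤ n → pvScanA x i = pvScanB y i := by
  intro n
  induction n with
  | zero =>
    intro i hn
    have hni : ¬ (i + 1) ∈ x := by
      intro hmem
      have := le_pvSetMax x (i + 1) hmem
      omega
    have hny : ¬ (i + 1) ∈ y := fun hy => hni ((h (i + 1)).mpr hy)
    rw [pvScanA, pvScanB]
    simp [hni, hny]
  | succ n ih =>
    intro i hn
    rw [pvScanA, pvScanB]
    by_cases hmem : (i + 1) ∈ x
    · have hy := (h (i + 1)).mp hmem
      have := le_pvSetMax x (i + 1) hmem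
      simp only [hmem, hy, dif_pos]
      exact ih (i + 1) (by omega)
    · have hny : ¬ (i + 1) ∈ y := fun hy => hmem ((h (i + 1)).mpr hy)
      simp [hmem, hny]

theorem scanB_step (s : PySem.Set Int) (k : Int) (h : (k + 1) ∈ s) :
    pvScanB s k = pvScanB s (k + 1) := by
  rw [pvScanB]; simp [h]

-- expand the 7-step fold of B
theorem foldB_eq (coins s : PySem.Set Int) :
    (List.range 7).foldl (fun s _ => pvGrowB s coins) s =
      pvGrowB (pvGrowB (pvGrowB (pvGrowB (pvGrowB (pvGrowB (pvGrowB s coins)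
        coins) coins) coins) coins) coins) coins := by
  simp [List.range_succ, show (7 : Nat) = 6 + 1 from rfl]

-- ===== VERDICT (by name: the statement is the Claim_ definition above) =====
theorem eight_coins_spec : Claim_equal_eight_coins := by
  intro c _
  unfold Spec_eight_coins eight_coins eight_coins_alt
  by_cases h1 : (1 : Int) ∈ c
  · have h1x : (1 : Int) ∈ PySem.Set.ofList c := (PySem.Set.mem_ofList _ _).mpr h1
    simp only [h1x, h1, if_pos]
    -- membership characterisations
    have Hc : ∀ v, v ∈ PySem.Set.ofList c ↔ v ∈ c := fun v => PySem.Set.mem_ofList _ _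
    have H1 : ∀ v, v ∈ PySem.Set.ofList c ↔ Reach c 1 v := by
      intro v
      rw [Hc v]
      constructor
      · intro hv; exact ⟨1, le_rfl, le_rfl, (NSum_one c v).mpr hv⟩
      · rintro ⟨j, hj1, hj, hn⟩
        have : j = 1 := by omega
        subst this
        exact (NSum_one c v).mp hn
    have HA : ∀ v, v ∈ pvRoundA (pvRoundA (pvRoundA (PySem.Set.ofList c))) ↔ Reach c 8 v := by
      have h2 := mem_roundA c _ 1 le_rfl H1
      have h4 := mem_roundA c _ 2 (by omega) h2
      have h8 := mem_roundA c _ 4 (by omega) h4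
      simpa using h8
    have H1' : ∀ v, v ∈ PySem.Set.ofList (PySem.Set.ofList c) ↔ Reach c 1 v := by
      intro v
      rw [PySem.Set.mem_ofList _ v, Hc v, ← Hc v, H1 v]
    have HB : ∀ v, v ∈ (List.range 7).foldl (fun s _ => pvGrowB s (PySem.Set.ofList c))
        (PySem.Set.ofList (PySem.Set.ofList c)) ↔ Reach c 8 v := by
      rw [foldB_eq]
      have g2 := mem_growB c _ _ 1 le_rfl Hc H1'
      have g3 := mem_growB c _ _ 2 (by omega) Hc g2
      have g4 := mem_growB c _ _ 3 (by omega) Hc g3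
      have g5 := mem_growB c _ _ 4 (by omega) Hc g4
      have g6 := mem_growB c _ _ 5 (by omega) Hc g5
      have g7 := mem_growB c _ _ 6 (by omega) Hc g6
      have g8 := mem_growB c _ _ 7 (by omega) Hc g7
      exact g8
    set S := (List.range 7).foldl (fun s _ => pvGrowB s (PySem.Set.ofList c))
      (PySem.Set.ofList (PySem.Set.ofList c)) with hS
    -- 1, 2, 3 are in S, so B's scan from 0 reaches 3
    have hmemS : ∀ j : Nat, 1 ≤ j → j ≤ 8 → ((j : Int) ∈ S) := fun j hj1 hj8 =>
      (HB (j : Int)).mpr (Reach_small c h1 j hj1 hj8)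
    have hs1 : (1 : Int) ∈ S := by exact_mod_cast hmemS 1 le_rfl (by omega)
    have hs2 : (2 : Int) ∈ S := by exact_mod_cast hmemS 2 (by omega) (by omega)
    have hs3 : (3 : Int) ∈ S := by exact_mod_cast hmemS 3 (by omega) (by omega)
    have hshift : pvScanB S 0 = pvScanB S 3 := by
      rw [scanB_step S 0 (by norm_num [hs1]), show (0 : Int) + 1 = 1 by norm_num,
          scanB_step S 1 (by norm_num [hs2]), show (1 : Int) + 1 = 2 by norm_num,
          scanB_step S 2 (by norm_num [hs3]), show (2 : Int) + 1 = 3 by norm_num]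
    rw [hshift]
    exact scan_congr _ S (fun v => by rw [HA v, ← HB v]) _ 3 le_rfl
  · have h1x : ¬ (1 : Int) ∈ PySem.Set.ofList c := fun h => h1 ((PySem.Set.mem_ofList _ _).mp h)
    simp [h1x, h1]
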